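-- pv_equiv track=rewrite | github.com/pypi-data/pypi-mirror-403 | packages/agentpool/agentpool-2.8.8-py3-none-any.whl/agentpool_toolsets/fsspec_toolset/helpers.py | truncate_lines
-- ===== SOURCE A (Python) =====
-- DEFAULT_MAX_SIZE = 64_000
--
-- def truncate_lines(
--     lines: list[str], offset: int = 0, limit: int | None = None, max_bytes: int = DEFAULT_MAX_SIZE
-- ) -> tuple[list[str], bool]:
--     """Truncate lines with offset/limit and byte size constraints.
--
--     Args:
--         lines: List of text lines
--         offset: Starting line index (0-based)
--         limit: Maximum number of lines to include (None = no limit)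
--         max_bytes: Maximum total bytes (default: 64KB)
--
--     Returns:
--         Tuple of (truncated_lines, was_truncated)
--     """
--     # Apply offset (supports negative indexing like Python lists)
--     start_idx = max(0, len(lines) + offset) if offset < 0 else min(offset, len(lines))
--     if start_idx >= len(lines):
--         return [], False
--     # Apply line limit
--     end_idx = min(len(lines), start_idx + limit) if limit is not None else len(lines)
--     # Apply byte limit
--     result_lines: list[str] = []
--     total_bytes = 0
--     for line in lines[start_idx:end_idx]:
--         line_bytes = len(line.encode("utf-8"))
--         if total_bytes + line_bytes > max_bytes:
--             # Would exceed limit - this is actual truncation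
--             return result_lines, True
--
--         result_lines.append(line)
--         total_bytes += line_bytes
--
--     # Successfully returned all requested content - not truncated
--     # (byte truncation already handled above with early return)
--     return result_lines, False
-- ===== SOURCE B (Python) =====
-- DEFAULT_MAX_SIZE = 64_000
--
-- def truncate_lines(lines, offset=0, limit=None, max_bytes=DEFAULT_MAX_SIZE):
--     """Slice-then-table reformulation: take the requested window, build the
--     table of cumulative byte totals, and binary-search it for the cut point
--     (the table is nondecreasing, so bisection finds the first overflow)."""
--     n = len(lines)
--     start_idx = max(0, n + offset) if offset < 0 else min(offset, n)
--     end_idx = min(n, start_idx + limit) if limit is not None else n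
--     sel = lines[start_idx:end_idx]
--     cums = []
--     t = 0
--     for l in sel:
--         t += len(l.encode("utf-8"))
--         cums.append(t)
--     lo, hi = 0, len(cums)
--     while lo < hi:
--         mid = (lo + hi) // 2
--         if cums[mid] <= max_bytes:
--             lo = mid + 1
--         else:
--             hi = mid
--     return sel[:lo], lo < len(sel)
-- ===== Notes on version B (the rewrite author's own statement) =====
-- stated objective: alternative
-- what changed: A fuses everything into one loop with an early return that appends lines while tracking a running byte total; B first slices the requested window, builds a prefix-sum table of byte sizes, binary-searches that nondecreasing table for the first total exceeding max_bytes, and returns sel[:k] with k < len(sel).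
import Mathlib
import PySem

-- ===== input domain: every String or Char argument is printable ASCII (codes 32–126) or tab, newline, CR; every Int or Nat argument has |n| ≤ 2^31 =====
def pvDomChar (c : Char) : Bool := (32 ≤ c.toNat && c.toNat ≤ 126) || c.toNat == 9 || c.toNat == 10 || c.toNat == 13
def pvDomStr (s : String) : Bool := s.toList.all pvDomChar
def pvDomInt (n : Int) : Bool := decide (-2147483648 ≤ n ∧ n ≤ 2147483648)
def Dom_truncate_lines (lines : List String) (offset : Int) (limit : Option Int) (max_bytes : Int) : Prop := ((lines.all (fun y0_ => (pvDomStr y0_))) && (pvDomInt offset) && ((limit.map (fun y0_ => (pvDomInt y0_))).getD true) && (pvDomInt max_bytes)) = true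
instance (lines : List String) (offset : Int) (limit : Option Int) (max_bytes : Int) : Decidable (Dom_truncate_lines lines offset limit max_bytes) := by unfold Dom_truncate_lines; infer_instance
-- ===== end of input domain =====

-- B replaces A's fused accumulate-and-append loop by: slice the window, build the
-- prefix-sum table of byte sizes, binary-search it for the cut point (objective: alternative).

-- ===== PORT A =====
-- the byte loop of A: appends lines while the running total stays within max_bytes,
-- early-returning (result so far, True) on the first line that would exceed it.
-- len(line.encode("utf-8")) is ported as PySem.Str.len: on the ASCII input domain
-- (Dom_truncate_lines) every character is one UTF-8 byte, so byte count = char count.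
def truncLoopA (max_bytes : Int) : List String → Int → List String × Bool
  | [], _ => ([], false)
  | l :: rest, total =>
      let line_bytes := PySem.Str.len l
      if total + line_bytes > max_bytes then ([], true)
      else
        let r := truncLoopA max_bytes rest (total + line_bytes)
        (l :: r.1, r.2)

def truncate_lines (lines : List String) (offset : Int) (limit : Option Int) (max_bytes : Int) : List String × Bool :=
  let start_idx : Int :=
    if offset < 0 then max 0 ((lines.length : Int) + offset) else min offset (lines.length : Int)
  if start_idx ≥ (lines.length : Int) then ([], false)
  else
    let end_idx : Int :=
      match limit with
      | some lim => min (lines.length : Int) (start_idx + lim)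
      | none => (lines.length : Int)
    truncLoopA max_bytes (PySem.List.slice lines (some start_idx) (some end_idx)) 0

-- ===== PORT B =====
-- the while-loop binary search of Source B over the prefix-sum table (mid written inline).
-- fuel is only a structural totality guard: it starts at hi - lo, which the loop body
-- strictly shrinks, so the 0-fuel arm is never reached from the call below.
def bsearchK (cums : List Int) (mb : Int) : Nat → Nat → Nat → Nat
  | lo, hi, fuel + 1 =>
    if lo < hi then
      -- cums[mid] is in range whenever this is reached (mid < hi ≤ len cums); getD is exact there
      if cums.getD ((lo + hi) / 2) 0 ≤ mb then bsearchK cums mb ((lo + hi) / 2 + 1) hi fuel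
      else bsearchK cums mb lo ((lo + hi) / 2) fuel
    else lo
  | lo, _, 0 => lo

def truncate_lines_alt (lines : List String) (offset : Int) (limit : Option Int) (max_bytes : Int) : List String × Bool :=
  let n : Int := (lines.length : Int)
  let start_idx : Int := if offset < 0 then max 0 (n + offset) else min offset n
  let end_idx : Int :=
    match limit with
    | some lim => min n (start_idx + lim)
    | none => n
  let sel := PySem.List.slice lines (some start_idx) (some end_idx)
  -- the cums-building for-loop of Source B (state: table built so far, running total)
  let cums := (sel.foldl (fun (st : List Int × Int) l =>
      (st.1 ++ [st.2 + PySem.Str.len l], st.2 + PySem.Str.len l)) ([], 0)).1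
  let k := bsearchK cums max_bytes 0 cums.length cums.length
  (sel.take k, decide (k < sel.length))

-- ===== PRECONDITION & SPEC =====
def Spec_truncate_lines (lines : List String) (offset : Int) (limit : Option Int) (max_bytes : Int) (out : List String × Bool) : Prop := out = truncate_lines_alt lines offset limit max_bytes
instance (lines : List String) (offset : Int) (limit : Option Int) (max_bytes : Int) (out : List String × Bool) : Decidable (Spec_truncate_lines lines offset limit max_bytes out) := by unfold Spec_truncate_lines; infer_instance

-- ===== CLAIM (what is proved, stated in full; the proofs are below) =====
def Claim_equal_truncate_lines : Prop := ∀ (lines : List String) (offset : Int) (limit : Option Int) (max_bytes : Int), Dom_truncate_lines lines offset limit max_bytes → Spec_truncate_lines lines offset limit max_bytes (truncate_lines lines offset limit max_bytes)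

-- ===== LEMMAS AND PROOFS =====

-- prefix sums of a size list starting from a running total
def pfx : List Int → Int → List Int
  | [], _ => []
  | s :: r, t => (t + s) :: pfx r (t + s)

-- the characterisation both sides are reduced to: k leading totals fit, the next does not
def cutSpec (cums : List Int) (mb : Int) (k : Nat) : Prop :=
  k ≤ cums.length ∧ (∀ i (h : i < cums.length), i < k → cums[i] ≤ mb) ∧
    (∀ h : k < cums.length, mb < cums[k])

-- the canonical witness of cutSpec
def cutK (cums : List Int) (mb : Int) : Nat :=
  match cums with
  | [] => 0
  | c :: r => if c ≤ mb then cutK r mb + 1 else 0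

theorem cutK_spec (cums : List Int) (mb : Int) : cutSpec cums mb (cutK cums mb) := by
  induction cums with
  | nil => exact ⟨by simp [cutK], by intro i h; simp at h, by intro h; simp at h⟩
  | cons c r ih =>
    obtain ⟨h1, h2, h3⟩ := ih
    by_cases hc : c ≤ mb
    · refine ⟨by simp [cutK, hc]; omega, ?_, ?_⟩
      · intro i h hik
        simp [cutK, hc] at hik
        match i with
        | 0 => simpa using hc
        | Nat.succ j =>
          simp only [List.getElem_cons_succ]
          exact h2 j (by simpa using h) (by omega)
      · intro h
        simp [cutK, hc] at h ⊢
        have hlt : cutK r mb < r.length := by simpa using h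
        simpa using h3 hlt
    · refine ⟨by simp [cutK, hc], by intro i h hik; simp [cutK, hc] at hik, ?_⟩
      intro h
      simp [cutK, hc]
      omega

theorem pfx_length (xs : List Int) (t : Int) : (pfx xs t).length = xs.length := by
  induction xs generalizing t with
  | nil => simp [pfx]
  | cons s r ih => simp [pfx, ih]

theorem le_pfx (xs : List Int) (t : Int) (hnn : ∀ s ∈ xs, 0 ≤ s) :
    ∀ x ∈ pfx xs t, t ≤ x := by
  induction xs generalizing t with
  | nil => simp [pfx]
  | cons s r ih =>
    intro x hx
    simp only [pfx, List.mem_cons] at hx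
    have hs : 0 ≤ s := hnn s (by simp)
    rcases hx with rfl | hx
    · omega
    · have := ih (t + s) (fun u hu => hnn u (by simp [hu])) x hx
      omega

theorem pfx_pairwise (xs : List Int) (t : Int) (hnn : ∀ s ∈ xs, 0 ≤ s) :
    (pfx xs t).Pairwise (· ≤ ·) := by
  induction xs generalizing t with
  | nil => simp [pfx]
  | cons s r ih =>
    simp only [pfx, List.pairwise_cons]
    refine ⟨fun x hx => le_pfx r (t + s) (fun u hu => hnn u (by simp [hu])) x hx,
      ih (t + s) (fun u hu => hnn u (by simp [hu]))⟩

-- the cums-building foldl of port B computes exactly the prefix sums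
theorem cums_eq (xs : List String) (acc : List Int) (t : Int) :
    (xs.foldl (fun (st : List Int × Int) l =>
        (st.1 ++ [st.2 + PySem.Str.len l], st.2 + PySem.Str.len l)) (acc, t)).1
      = acc ++ pfx (xs.map PySem.Str.len) t := by
  induction xs generalizing acc t with
  | nil => simp [pfx]
  | cons l r ih =>
    simp only [List.foldl_cons, List.map_cons, pfx]
    rw [ih (acc ++ [t + PySem.Str.len l]) (t + PySem.Str.len l), List.append_assoc,
      List.singleton_append]

-- A's byte loop, characterised through cutSpec of the prefix sums
theorem truncLoopA_eq (mb : Int) (xs : List String) : ∀ (t : Int) (k : Nat),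
    cutSpec (pfx (xs.map PySem.Str.len) t) mb k →
    truncLoopA mb xs t = (xs.take k, decide (k < xs.length)) := by
  induction xs with
  | nil =>
    intro t k hk
    obtain ⟨h1, -, -⟩ := hk
    simp only [List.map_nil, pfx, List.length_nil, Nat.le_zero] at h1
    subst h1
    simp [truncLoopA]
  | cons l r ih =>
    intro t k hk
    obtain ⟨h1, h2, h3⟩ := hk
    simp only [List.map_cons, pfx] at h1 h2 h3
    simp only [truncLoopA]
    by_cases hc : t + PySem.Str.len l > mb
    · rw [if_pos hc]
      have hk0 : k = 0 := by
        by_contra hne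
        have h00 := h2 0 (by simp) (by omega)
        simp only [List.getElem_cons_zero] at h00
        omega
      subst hk0
      simp
    · rw [if_neg hc]
      have hkpos : 0 < k := by
        rcases Nat.eq_zero_or_pos k with rfl | h
        · have h00 := h3 (by simp)
          simp only [List.getElem_cons_zero] at h00
          omega
        · exact h
      obtain ⟨k', rfl⟩ : ∃ k', k = k' + 1 := ⟨k - 1, by omega⟩
      have hk' : cutSpec (pfx (r.map PySem.Str.len) (t + PySem.Str.len l)) mb k' := by
        refine ⟨?_, ?_, ?_⟩
        · simp only [List.length_cons] at h1; omega
        · intro i h hik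
          have h2' := h2 (i + 1) (by simp only [List.length_cons]; omega) (by omega)
          simpa only [List.getElem_cons_succ] using h2'
        · intro h
          have h3' := h3 (by simp only [List.length_cons]; omega)
          simpa only [List.getElem_cons_succ] using h3'
      rw [ih (t + PySem.Str.len l) k' hk']
      simp

-- the binary search of port B lands exactly on any cutSpec point of a nondecreasing table
theorem bsearchK_eq (cums : List Int) (mb : Int) (k : Nat)
    (hpw : cums.Pairwise (· ≤ ·)) (hk : cutSpec cums mb k) :
    ∀ fuel lo hi, hi - lo ≤ fuel → hi ≤ cums.length → lo ≤ k → k ≤ hi →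
      bsearchK cums mb lo hi fuel = k := by
  obtain ⟨hk1, hk2, hk3⟩ := hk
  have mono : ∀ i j (hi : i < cums.length) (hj : j < cums.length), i ≤ j → cums[i] ≤ cums[j] := by
    intro i j hi hj hij
    rcases Nat.eq_or_lt_of_le hij with rfl | hlt
    · exact le_refl _
    · exact List.pairwise_iff_getElem.mp hpw i j hi hj hlt
  intro fuel
  induction fuel with
  | zero =>
    intro lo hi hd hhi hlo hkhi
    simp only [bsearchK]
    omega
  | succ f ihf =>
    intro lo hi hd hhi hlo hkhi
    simp only [bsearchK]
    by_cases hlt : lo < hi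
    · rw [if_pos hlt]
      have hmlen : (lo + hi) / 2 < cums.length := by omega
      rw [List.getD_eq_getElem cums 0 hmlen]
      by_cases hcm : cums[(lo + hi) / 2] ≤ mb
      · rw [if_pos hcm]
        have hmk : (lo + hi) / 2 < k := by
          by_contra hge
          have hkl : k < cums.length := by omega
          have h1 := mono k ((lo + hi) / 2) hkl hmlen (by omega)
          have h2 := hk3 hkl
          omega
        exact ihf ((lo + hi) / 2 + 1) hi (by omega) hhi (by omega) hkhi
      · rw [if_neg hcm]
        have hkm : k ≤ (lo + hi) / 2 := by
          by_contra hgt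
          exact hcm (hk2 _ hmlen (by omega))
        exact ihf lo ((lo + hi) / 2) (by omega) (by omega) hlo hkm
    · rw [if_neg hlt]
      omega

theorem str_len_nonneg (l : String) : 0 ≤ PySem.Str.len l := by
  rw [PySem.Str.len_eq]; positivity

-- the main bridge on one selected window: A's loop = B's table-and-bisect computation
theorem window_eq (sel : List String) (mb : Int) :
    truncLoopA mb sel 0 =
      (sel.take (bsearchK ((sel.foldl (fun (st : List Int × Int) l =>
          (st.1 ++ [st.2 + PySem.Str.len l], st.2 + PySem.Str.len l)) ([], 0)).1) mb 0
          ((sel.foldl (fun (st : List Int × Int) l =>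
          (st.1 ++ [st.2 + PySem.Str.len l], st.2 + PySem.Str.len l)) ([], 0)).1).length
          ((sel.foldl (fun (st : List Int × Int) l =>
          (st.1 ++ [st.2 + PySem.Str.len l], st.2 + PySem.Str.len l)) ([], 0)).1).length),
        decide ((bsearchK ((sel.foldl (fun (st : List Int × Int) l =>
          (st.1 ++ [st.2 + PySem.Str.len l], st.2 + PySem.Str.len l)) ([], 0)).1) mb 0
          ((sel.foldl (fun (st : List Int × Int) l =>
          (st.1 ++ [st.2 + PySem.Str.len l], st.2 + PySem.Str.len l)) ([], 0)).1).length
          ((sel.foldl (fun (st : List Int × Int) l =>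
          (st.1 ++ [st.2 + PySem.Str.len l], st.2 + PySem.Str.len l)) ([], 0)).1).length) < sel.length)) := by
  have hc : (sel.foldl (fun (st : List Int × Int) l =>
      (st.1 ++ [st.2 + PySem.Str.len l], st.2 + PySem.Str.len l)) ([], 0)).1
      = pfx (sel.map PySem.Str.len) 0 := by
    simpa using cums_eq sel [] 0
  rw [hc]
  set cums := pfx (sel.map PySem.Str.len) 0 with hcums
  have hnn : ∀ s ∈ sel.map PySem.Str.len, 0 ≤ s := by
    intro s hs
    simp only [List.mem_map] at hs
    obtain ⟨l, _, rfl⟩ := hs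
    exact str_len_nonneg l
  have hpw : cums.Pairwise (· ≤ ·) := pfx_pairwise _ _ hnn
  have hspec := cutK_spec cums mb
  have hlen : cums.length = sel.length := by
    rw [hcums, pfx_length, List.length_map]
  have hb : bsearchK cums mb 0 cums.length cums.length = cutK cums mb :=
    bsearchK_eq cums mb (cutK cums mb) hpw hspec cums.length 0 cums.length (by omega)
      (le_refl _) (by omega) hspec.1
  rw [hb]
  rw [truncLoopA_eq mb sel 0 (cutK cums mb) hspec]

-- the empty-slice case: lines[start:end] with len(lines) ≤ start is []
theorem slice_empty (xs : List String) (a b : Int) (ha : (xs.length : Int) ≤ a) :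
    PySem.List.slice xs (some a) (some b) = [] := by
  simp only [PySem.List.slice]
  have h1 : PySem.List.clampIdx xs.length a = xs.length := by
    unfold PySem.List.clampIdx
    split_ifs <;> omega
  rw [h1]
  simp

-- the empty-window case of port B evaluates to ([], false)
theorem alt_empty (lines : List String) (s e mb : Int) (hs : (lines.length : Int) ≤ s) :
    (let sel := PySem.List.slice lines (some s) (some e);
     let cums := (sel.foldl (fun (st : List Int × Int) l =>
        (st.1 ++ [st.2 + PySem.Str.len l], st.2 + PySem.Str.len l)) ([], 0)).1;
     let k := bsearchK cums mb 0 cums.length cums.length;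
     ((sel.take k : List String), decide (k < sel.length))) = ([], false) := by
  simp only [slice_empty lines s e hs]
  simp [bsearchK]

-- ===== VERDICT (by name: the statement is the Claim_ definition above) =====
theorem truncate_lines_spec : Claim_equal_truncate_lines := by
  intro lines offset limit max_bytes _
  unfold Spec_truncate_lines
  rw [truncate_lines.eq_def]
  dsimp only
  by_cases hge : (if offset < 0 then max 0 ((lines.length : Int) + offset)
      else min offset (lines.length : Int)) ≥ (lines.length : Int)
  · rw [if_pos hge]
    exact (alt_empty lines _ _ max_bytes hge).symm
  · rw [if_neg hge]
    exact window_eq _ max_bytes
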